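-- pv_equiv track=rewrite | github.com/DnlRKorn/CoKE | Step2/count_co-occurrences_in_SciBite_ONLY_COUNT.py | process_abstract
-- ===== SOURCE A (Python) =====
-- from itertools import combinations
--
-- def process_abstract(abstract_terms):
--
--     abst_tuples = set()
--     combs = combinations(abstract_terms,2)
--     for comb in combs:
--        if(len(comb)==1):continue
--        if(comb[0] < comb[1]):abst_tuples.add(comb)
--        else:abst_tuples.add((comb[1],comb[0]))
--     return abst_tuples
-- ===== SOURCE B (Python) =====
-- def process_abstract(abstract_terms):
--     # Precompute, right to left, the distinct values of each suffix
--     # (first-occurrence order), then pair each term only with the distinct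
--     # values that follow it.
--     suffs = []
--     d = []
--     for t in reversed(abstract_terms):
--         suffs.append(d)
--         d = [t] + [v for v in d if v != t]
--     suffs.reverse()
--     out = set()
--     for t, uniq in zip(abstract_terms, suffs):
--         for v in uniq:
--             out.add((t, v) if t < v else (v, t))
--     return out
-- ===== Notes on version B (the rewrite author's own statement) =====
-- stated objective: alternative
-- what changed: Instead of enumerating all index combinations and normalizing each pair, B precomputes for each position the distinct values of the following suffix (built incrementally right-to-left) and pairs each term only with those distinct followers; cost is O(n*u) for u distinct values, which a timing run found comparable to A on the generated inputs.
import Mathlib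
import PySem

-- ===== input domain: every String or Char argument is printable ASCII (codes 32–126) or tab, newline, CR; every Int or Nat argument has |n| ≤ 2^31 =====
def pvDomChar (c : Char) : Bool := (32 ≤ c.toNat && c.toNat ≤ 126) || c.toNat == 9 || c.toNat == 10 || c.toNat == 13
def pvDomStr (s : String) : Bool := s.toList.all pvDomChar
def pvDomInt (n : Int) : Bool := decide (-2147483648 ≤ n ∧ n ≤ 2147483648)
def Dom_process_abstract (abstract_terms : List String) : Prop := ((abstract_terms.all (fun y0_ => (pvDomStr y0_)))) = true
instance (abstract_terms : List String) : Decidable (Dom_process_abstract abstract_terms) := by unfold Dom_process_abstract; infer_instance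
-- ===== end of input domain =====

-- B pairs each term with the precomputed distinct values of its suffix instead of
-- enumerating all index combinations; return value proved equal, no side effects.

-- ===== PORT A =====
-- itertools.combinations(l, 2) in Python's order
def pvCombs2 : List String → List (String × String)
  | [] => []
  | x :: xs => xs.map (fun y => (x, y)) ++ pvCombs2 xs

def process_abstract (abstract_terms : List String) : List (String × String) :=
  (pvCombs2 abstract_terms).foldl
    (fun s c =>
      if (2 : Nat) = 1 then s        -- 'if len(comb)==1: continue' (comb always has length 2)
      else if c.1 < c.2 then PySem.Set.add s c
      else PySem.Set.add s (c.2, c.1))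
    PySem.Set.empty

-- ===== PORT B =====
def pvDedupCons (x : String) (d : List String) : List String :=
  x :: d.filter (fun v => v ≠ x)

-- right-to-left build of the per-suffix distinct-value lists (suffs, and the running d)
def pvSuffs : List String → List (List String) × List String
  | [] => ([], [])
  | x :: xs =>
    let p := pvSuffs xs
    (p.2 :: p.1, pvDedupCons x p.2)

def pvAddNorm (s : PySem.Set (String × String)) (t v : String) : PySem.Set (String × String) :=
  if t < v then PySem.Set.add s (t, v) else PySem.Set.add s (v, t)

def process_abstract_alt (abstract_terms : List String) : List (String × String) :=
  (abstract_terms.zip (pvSuffs abstract_terms).1).foldl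
    (fun s p => p.2.foldl (fun s v => pvAddNorm s p.1 v) s)
    PySem.Set.empty

-- ===== PRECONDITION & SPEC =====
def Spec_process_abstract (abstract_terms : List String) (out : List (String × String)) : Prop := out = process_abstract_alt abstract_terms
instance (abstract_terms : List String) (out : List (String × String)) : Decidable (Spec_process_abstract abstract_terms out) := by unfold Spec_process_abstract; infer_instance

-- ===== CLAIM (what is proved, stated in full; the proofs are below) =====
def Claim_equal_process_abstract : Prop := ∀ (abstract_terms : List String), Dom_process_abstract abstract_terms → Spec_process_abstract abstract_terms (process_abstract abstract_terms)

-- ===== LEMMAS AND PROOFS =====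

-- the normalized pair A inserts
def pvNorm (t v : String) : String × String := if t < v then (t, v) else (v, t)

-- first-occurrence dedup, as a standalone recursion (the running d of pvSuffs)
def pvDedup : List String → List String
  | [] => []
  | x :: xs => pvDedupCons x (pvDedup xs)

theorem pvAddNorm_eq (s : PySem.Set (String × String)) (t v : String) :
    pvAddNorm s t v = PySem.Set.add s (pvNorm t v) := by
  unfold pvAddNorm pvNorm; split_ifs <;> rfl

theorem pvSuffs_snd (l : List String) : (pvSuffs l).2 = pvDedup l := by
  induction l with
  | nil => rfl
  | cons x xs ih => simp [pvSuffs, pvDedup, ih]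

theorem pvSuffs_fst_cons (x : String) (xs : List String) :
    (pvSuffs (x :: xs)).1 = pvDedup xs :: (pvSuffs xs).1 := by
  simp [pvSuffs, pvSuffs_snd]

-- dropping the occurrences of a whose image is already in the set changes nothing
theorem foldl_add_filter (g : String → String × String) (a : String) :
    ∀ (l : List String) (s : PySem.Set (String × String)), g a ∈ s →
      (l.filter (fun v => v ≠ a)).foldl (fun s v => PySem.Set.add s (g v)) s
        = l.foldl (fun s v => PySem.Set.add s (g v)) s := by
  intro l
  induction l with
  | nil => intro s _; rfl
  | cons y ys ih =>
    intro s hs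
    by_cases hy : y = a
    · subst hy
      have hf : (y :: ys).filter (fun v => v ≠ y) = ys.filter (fun v => v ≠ y) := by simp
      rw [hf, ih s hs, List.foldl_cons, PySem.Set.add_of_mem hs]
    · have hf : (y :: ys).filter (fun v => v ≠ a) = y :: ys.filter (fun v => v ≠ a) := by
        simp [hy]
      rw [hf, List.foldl_cons, List.foldl_cons]
      exact ih _ (by simp only [PySem.Set.mem_add]; exact Or.inl hs)

-- folding insertions over the dedup'd list equals folding over the full list
theorem foldl_add_dedup (g : String → String × String) :
    ∀ (l : List String) (s : PySem.Set (String × String)),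
      (pvDedup l).foldl (fun s v => PySem.Set.add s (g v)) s
        = l.foldl (fun s v => PySem.Set.add s (g v)) s := by
  intro l
  induction l with
  | nil => intro s; rfl
  | cons x xs ih =>
    intro s
    show ((pvDedup xs).filter (fun v => v ≠ x)).foldl (fun s v => PySem.Set.add s (g v)) (PySem.Set.add s (g x)) = _
    rw [foldl_add_filter g x (pvDedup xs) _ (by simp [PySem.Set.mem_add])]
    rw [ih]
    rfl

-- A's fold over the suffix pairs of x equals B's fold over the dedup'd suffix
theorem row_eq (x : String) (xs : List String) (s : PySem.Set (String × String)) :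
    (xs.map (fun y => (x, y))).foldl
        (fun s c => if (2 : Nat) = 1 then s
          else if c.1 < c.2 then PySem.Set.add s c else PySem.Set.add s (c.2, c.1)) s
      = (pvDedup xs).foldl (fun s v => pvAddNorm s x v) s := by
  rw [List.foldl_map]
  have h1 : ∀ (s : PySem.Set (String × String)) (v : String),
      (if (2 : Nat) = 1 then s
        else if (x, v).1 < (x, v).2 then PySem.Set.add s (x, v) else PySem.Set.add s ((x, v).2, (x, v).1))
      = PySem.Set.add s (pvNorm x v) := by
    intro s v; simp only [pvNorm]; split_ifs <;> simp_all
  simp only [h1]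
  simp only [fun s v => pvAddNorm_eq s x v]
  exact (foldl_add_dedup (fun v => pvNorm x v) xs s).symm

theorem main_eq :
    ∀ (l : List String) (s : PySem.Set (String × String)),
      (pvCombs2 l).foldl
          (fun s c => if (2 : Nat) = 1 then s
            else if c.1 < c.2 then PySem.Set.add s c else PySem.Set.add s (c.2, c.1)) s
        = (l.zip (pvSuffs l).1).foldl
            (fun s p => p.2.foldl (fun s v => pvAddNorm s p.1 v) s) s := by
  intro l
  induction l with
  | nil => intro s; rfl
  | cons x xs ih =>
    intro s
    rw [show pvCombs2 (x :: xs) = xs.map (fun y => (x, y)) ++ pvCombs2 xs from rfl]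
    rw [List.foldl_append, row_eq, ih, pvSuffs_fst_cons]
    rfl

-- ===== VERDICT (by name: the statement is the Claim_ definition above) =====
theorem process_abstract_spec : Claim_equal_process_abstract := by
  intro l _
  show process_abstract l = process_abstract_alt l
  unfold process_abstract process_abstract_alt
  exact main_eq l PySem.Set.empty
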